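-- pv_equiv track=rewrite | github.com/JohnReilly70/Python-Exercises | Exercise.py | swedishizing_words
-- ===== SOURCE A (Python) =====
-- def vowel(char):
--     vowel_list = ['a','e','o','i','u']
--     if char.lower() in vowel_list:
--         return True
--     else:
--         return False
--
-- def swedishizing_words(string):
--     swedish = []
--     for char in string:
--         if (vowel(char)) or (char == " "):
--             swedish.append(char)
--         else:
--             swedish.append(char + "o" + char)
--
--     return "".join(swedish)
-- ===== SOURCE B (Python) =====
-- def swedishizing_words(string):
--     # Staged rewriting: one whole-string replace pass per distinct consonant.
--     # Inserted characters are the consonant itself (processed exactly once,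
--     # since we iterate over the set) and 'o' (a vowel), so later passes never
--     # touch text produced by earlier ones; hence the pass order is irrelevant.
--     for c in set(string):
--         if c not in "aeiouAEIOU ":
--             string = string.replace(c, c + "o" + c)
--     return string
-- ===== Notes on version B (the rewrite author's own statement) =====
-- stated objective: alternative
-- what changed: Replaces A's single per-character loop with vowel helper, list accumulator and join by staged whole-string str.replace passes, one per distinct consonant occurring in the input; correctness rests on inserted characters (the consonant itself, handled exactly once, and the vowel 'o') never being touched by later passes.
import Mathlib
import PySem

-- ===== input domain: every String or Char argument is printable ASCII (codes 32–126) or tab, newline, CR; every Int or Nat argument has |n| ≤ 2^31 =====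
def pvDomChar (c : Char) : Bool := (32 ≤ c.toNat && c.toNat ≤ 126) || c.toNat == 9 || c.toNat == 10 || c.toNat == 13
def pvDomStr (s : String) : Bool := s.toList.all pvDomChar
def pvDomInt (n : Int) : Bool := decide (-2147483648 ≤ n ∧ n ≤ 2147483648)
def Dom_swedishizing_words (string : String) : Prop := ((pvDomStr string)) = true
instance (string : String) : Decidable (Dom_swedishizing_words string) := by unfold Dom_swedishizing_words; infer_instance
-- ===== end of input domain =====

-- B replaces A's single per-character loop (vowel helper, list accumulator, join) by
-- staged whole-string str.replace passes, one per distinct consonant of the input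
-- (alternative decomposition; inserted characters are never touched by later passes).

-- ===== PORT A =====
-- char.lower() on the one-character string char is PySem.Chars.lowerChar (exact);
-- membership in the list of one-character strings is membership of the character.
def vowelPort (char : Char) : Bool :=
  let vowel_list : List Char := ['a', 'e', 'o', 'i', 'u']
  if vowel_list.contains (PySem.Chars.lowerChar char) then true else false

def swedishizing_words (string : String) : String :=
  let swedish : List String := string.toList.foldl
    (fun acc char =>
      if vowelPort char || (char == ' ') then acc ++ [String.ofList [char]]
      -- char + "o" + char: the concatenation is done on the code-point lists (exact)
      else acc ++ [String.ofList ([char] ++ ['o'] ++ [char])]) []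
  PySem.Str.join "" swedish

-- ===== PORT B =====
-- 'for c in set(string)': set(string) is PySem.Set.ofList of the characters;
-- 'c not in "aeiouAEIOU "' for the single character c is non-membership of c among
-- its characters (exact); string.replace(c, c + "o" + c) on the one-character
-- pattern is PySem.Str.replace (exact); rebinding the loop variable 'string' is the
-- fold's accumulator.
def swedishizing_words_alt (string : String) : String :=
  (PySem.Set.ofList string.toList).foldl
    (fun s c =>
      if !(("aeiouAEIOU ".toList).contains c) then
        PySem.Str.replace s (String.ofList [c]) (String.ofList ([c] ++ ['o'] ++ [c]))
      else s) string

-- ===== PRECONDITION & SPEC =====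
def Spec_swedishizing_words (string : String) (out : String) : Prop := out = swedishizing_words_alt string
instance (string : String) (out : String) : Decidable (Spec_swedishizing_words string out) := by unfold Spec_swedishizing_words; infer_instance

-- ===== CLAIM (what is proved, stated in full; the proofs are below) =====
def Claim_equal_swedishizing_words : Prop := ∀ (string : String), Dom_swedishizing_words string → Spec_swedishizing_words string (swedishizing_words string)

-- ===== LEMMAS AND PROOFS =====

theorem join_nil_flatten (ps : List (List Char)) : PySem.Chars.join [] ps = ps.flatten := by
  unfold PySem.Chars.join
  induction ps with
  | nil => rfl
  | cons h t ih =>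
    cases t with
    | nil => simp [List.intercalate]
    | cons h2 t2 =>
      simp only [List.intercalate, List.intersperse, List.flatten] at *
      simp_all

theorem char_eq_of_toNat (a b : Char) (h : a.toNat = b.toNat) : a = b := by
  apply Char.ext; exact UInt32.toNat_inj.mp h

theorem toNat_lowerChar (c : Char) :
    (PySem.Chars.lowerChar c).toNat =
      if 65 ≤ c.toNat ∧ c.toNat ≤ 90 then c.toNat + 32 else c.toNat := by
  unfold PySem.Chars.lowerChar PySem.Chars.isupper
  have hle : ('A' ≤ c ∧ c ≤ 'Z') ↔ (65 ≤ c.toNat ∧ c.toNat ≤ 90) := by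
    rw [Char.le_def, Char.le_def, UInt32.le_iff_toNat_le, UInt32.le_iff_toNat_le]
    exact Iff.rfl
  by_cases h : 65 ≤ c.toNat ∧ c.toNat ≤ 90
  · have h' := hle.mpr h
    simp only [h'.1, h'.2, decide_true, Bool.and_self, if_true, h]
    rw [Char.toNat_ofNat]
    have : Nat.isValidChar (c.toNat + 32) := Or.inl (by omega)
    simp [this]
  · have h' : ¬ ('A' ≤ c ∧ c ≤ 'Z') := fun hh => h (hle.mp hh)
    rcases Decidable.not_and_iff_not_or_not.mp h' with hh | hh <;> simp [hh, h]

theorem mem5 (d : Char) : ((['a','e','o','i','u'] : List Char).contains d = true) ↔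
    (d.toNat = 97 ∨ d.toNat = 101 ∨ d.toNat = 111 ∨ d.toNat = 105 ∨ d.toNat = 117) := by
  constructor
  · intro h; simp at h; rcases h with h|h|h|h|h <;> subst h <;> simp [Char.toNat]
  · intro h
    rcases h with h|h|h|h|h <;>
      [ (have := char_eq_of_toNat d 'a' (by rw [h]; rfl));
        (have := char_eq_of_toNat d 'e' (by rw [h]; rfl));
        (have := char_eq_of_toNat d 'o' (by rw [h]; rfl));
        (have := char_eq_of_toNat d 'i' (by rw [h]; rfl));
        (have := char_eq_of_toNat d 'u' (by rw [h]; rfl))] <;>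
      subst this <;> decide

theorem mem11 (d : Char) : ((("aeiouAEIOU ".toList)).contains d = true) ↔
    (d.toNat = 97 ∨ d.toNat = 101 ∨ d.toNat = 105 ∨ d.toNat = 111 ∨ d.toNat = 117 ∨
     d.toNat = 65 ∨ d.toNat = 69 ∨ d.toNat = 73 ∨ d.toNat = 79 ∨ d.toNat = 85 ∨ d.toNat = 32) := by
  rw [show "aeiouAEIOU ".toList = ['a','e','i','o','u','A','E','I','O','U',' '] from rfl]
  constructor
  · intro h; simp at h
    rcases h with h|h|h|h|h|h|h|h|h|h|h <;> subst h <;> simp [Char.toNat]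
  · intro h
    rcases h with h|h|h|h|h|h|h|h|h|h|h <;>
      [ (have := char_eq_of_toNat d 'a' (by rw [h]; rfl));
        (have := char_eq_of_toNat d 'e' (by rw [h]; rfl));
        (have := char_eq_of_toNat d 'i' (by rw [h]; rfl));
        (have := char_eq_of_toNat d 'o' (by rw [h]; rfl));
        (have := char_eq_of_toNat d 'u' (by rw [h]; rfl));
        (have := char_eq_of_toNat d 'A' (by rw [h]; rfl));
        (have := char_eq_of_toNat d 'E' (by rw [h]; rfl));
        (have := char_eq_of_toNat d 'I' (by rw [h]; rfl));
        (have := char_eq_of_toNat d 'O' (by rw [h]; rfl));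
        (have := char_eq_of_toNat d 'U' (by rw [h]; rfl));
        (have := char_eq_of_toNat d ' ' (by rw [h]; rfl))] <;>
      subst this <;> decide

-- A's test (vowel or space) is the negation of B's consonant class.
theorem cond_eq (c : Char) :
    (vowelPort c || (c == ' ')) = (("aeiouAEIOU ".toList).contains c) := by
  rw [Bool.eq_iff_iff]
  have hsp : ((c == ' ') = true) ↔ c.toNat = 32 := by
    constructor
    · intro h; have := eq_of_beq h; subst this; rfl
    · intro h; have := char_eq_of_toNat c ' ' (by rw [h]; rfl); subst this; rfl
  have hv : vowelPort c = (['a','e','o','i','u'] : List Char).contains (PySem.Chars.lowerChar c) := by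
    unfold vowelPort
    by_cases hc : (['a','e','o','i','u'] : List Char).contains (PySem.Chars.lowerChar c) = true
    · rw [if_pos hc, hc]
    · rw [if_neg hc]
      exact ((Bool.not_eq_true _).mp hc).symm
  have hl := toNat_lowerChar c
  constructor
  · intro h
    rw [Bool.or_eq_true] at h
    rw [mem11]
    rcases h with h | h
    · rw [hv] at h
      have := (mem5 _).mp h
      rw [hl] at this
      by_cases hr : 65 ≤ c.toNat ∧ c.toNat ≤ 90 <;> simp [hr] at this <;> omega
    · rw [hsp] at h; omega
  · intro h
    rw [mem11] at h
    rw [Bool.or_eq_true]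
    by_cases hs : c.toNat = 32
    · right; exact hsp.mpr hs
    · left
      rw [hv, mem5, hl]
      by_cases hr : 65 ≤ c.toNat ∧ c.toNat ≤ 90 <;> simp [hr] <;> omega

-- One str.replace pass with a one-character pattern maps every character pointwise.
theorem replace_go_single (c : Char) (new : List Char) :
    ∀ (fuel : Nat) (l acc : List Char), l.length ≤ fuel →
      PySem.Chars.replace.go [c] new fuel l acc =
        acc.reverse ++ l.flatMap (fun d => if d = c then new else [d]) := by
  intro fuel
  induction fuel with
  | zero =>
    intro l acc h
    have : l = [] := List.length_eq_zero_iff.mp (Nat.le_zero.mp h)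
    subst this; simp [PySem.Chars.replace.go]
  | succ n ih =>
    intro l acc h
    cases l with
    | nil => simp [PySem.Chars.replace.go]
    | cons d t =>
      simp only [PySem.Chars.replace.go]
      by_cases hd : d = c
      · subst hd
        have hp : ([d] : List Char).isPrefixOf (d :: t) = true := by
          simp [List.isPrefixOf]
        rw [if_pos hp]
        have hdrop : List.drop ([d] : List Char).length (d :: t) = t := rfl
        rw [hdrop]
        rw [ih t (new.reverse ++ acc) (by simpa using Nat.lt_succ_iff.mp (by simpa using h))]
        simp
      · have hp : ([c] : List Char).isPrefixOf (d :: t) = false := by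
          simp [List.isPrefixOf]
          exact fun hh => absurd hh.symm hd
        rw [if_neg (by simp [hp])]
        rw [ih t (d :: acc) (by simpa using Nat.lt_succ_iff.mp (by simpa using h))]
        simp [hd]

theorem replace_single (c : Char) (new l : List Char) :
    PySem.Chars.replace l [c] new = l.flatMap (fun d => if d = c then new else [d]) := by
  unfold PySem.Chars.replace
  rw [if_neg (by simp)]
  rw [replace_go_single c new l.length l [] (le_refl _)]
  simp

-- the shape each original character has after the passes for the consonants in P
def expandP (P : List Char) (d : Char) : List Char :=
  if d ∈ P then [d, 'o', d] else [d]

-- the staged passes over a duplicate-free list of consonants build the pointwise expansion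
theorem foldl_passes (s0 : List Char) :
    ∀ (L P : List Char), (∀ e ∈ L, e ∉ P) → L.Nodup →
      (∀ e ∈ L, ("aeiouAEIOU ".toList).contains e = false) →
      L.foldl (fun s c => s.flatMap (fun d => if d = c then [c, 'o', c] else [d]))
        (s0.flatMap (expandP P)) = s0.flatMap (expandP (P ++ L)) := by
  intro L
  induction L with
  | nil => intro P _ _ _; simp
  | cons c t ih =>
    intro P hP hnd hcons
    have hco : c ≠ 'o' := by
      intro h; subst h
      have := hcons 'o' (by simp)
      simp at this
    have hcP : c ∉ P := hP c (by simp)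
    have hstep : (s0.flatMap (expandP P)).flatMap (fun d => if d = c then [c, 'o', c] else [d]) =
        s0.flatMap (expandP (P ++ [c])) := by
      rw [List.flatMap_assoc]
      apply List.flatMap_congr
      intro d _
      by_cases hdP : d ∈ P
      · have hdc : d ≠ c := fun h => hcP (h ▸ hdP)
        simp [expandP, hdP, hdc, Ne.symm hco]
      · by_cases hdc : d = c
        · subst hdc; simp [expandP, hdP]
        · simp [expandP, hdP, hdc]
    simp only [List.foldl_cons, hstep]
    rw [ih (P ++ [c])
      (fun e he => by
        have h1 := hP e (by simp [he])
        have h2 : e ≠ c := by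
          intro h; subst h; exact (List.nodup_cons.mp hnd).1 he
        simp [h1, h2])
      (List.nodup_cons.mp hnd).2
      (fun e he => hcons e (by simp [he]))]
    simp

-- pushing toList through B's String-state fold
theorem toList_foldl_replace (L : List Char) (s : String) :
    (L.foldl (fun s c => PySem.Str.replace s (String.ofList [c]) (String.ofList ([c] ++ ['o'] ++ [c]))) s).toList =
      L.foldl (fun l c => l.flatMap (fun d => if d = c then [c, 'o', c] else [d])) s.toList := by
  induction L generalizing s with
  | nil => rfl
  | cons c t ih =>
    simp only [List.foldl_cons, ih]
    congr 1
    simp [PySem.Str.replace, replace_single]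

-- ===== VERDICT (by name: the statement is the Claim_ definition above) =====
theorem swedishizing_words_spec : Claim_equal_swedishizing_words := by
  intro s _
  unfold Spec_swedishizing_words swedishizing_words swedishizing_words_alt
  -- A's side: join of the per-character pieces is a flatMap
  have hfun : (fun (acc : List String) (char : Char) =>
      if vowelPort char || (char == ' ') then acc ++ [String.ofList [char]]
      else acc ++ [String.ofList ([char] ++ ['o'] ++ [char])]) =
      (fun acc char => acc ++ [if vowelPort char || (char == ' ') then String.ofList [char]
        else String.ofList ([char] ++ ['o'] ++ [char])]) := by
    funext acc char; split <;> rfl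
  apply String.toList_inj.mp
  simp only [hfun, PySem.List.foldl_append_singleton_eq_map, List.nil_append]
  rw [PySem.Str.toList_join]
  simp only [List.map_map]
  rw [show ("" : String).toList = [] from rfl, join_nil_flatten, ← List.flatMap_def]
  -- B's side: turn the guarded fold over the set into a fold over the filtered set,
  -- then apply the staged-pass lemma
  have hsplit : ((PySem.Set.ofList s.toList).foldl
      (fun t c =>
        if !(("aeiouAEIOU ".toList).contains c) then
          PySem.Str.replace t (String.ofList [c]) (String.ofList ([c] ++ ['o'] ++ [c]))
        else t) s) =
      (((PySem.Set.ofList s.toList).filter (fun c => !(("aeiouAEIOU ".toList).contains c))).foldl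
        (fun t c => PySem.Str.replace t (String.ofList [c]) (String.ofList ([c] ++ ['o'] ++ [c]))) s) := by
    rw [List.foldl_filter]
  rw [hsplit, toList_foldl_replace]
  set L := (PySem.Set.ofList s.toList).filter (fun c => !(("aeiouAEIOU ".toList).contains c)) with hL
  have h0 : s.toList = s.toList.flatMap (expandP []) := by
    rw [show expandP [] = (fun d => [d]) from funext (fun d => by simp [expandP])]
    simp
  have hB : L.foldl (fun l c => l.flatMap (fun d => if d = c then [c, 'o', c] else [d])) s.toList =
      s.toList.flatMap (expandP L) := by
    conv_lhs => rw [h0]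
    rw [foldl_passes s.toList L []
      (by intro e _; exact List.not_mem_nil)
      ((PySem.Set.nodup_ofList s.toList).filter _)
      (by intro e he; have := (List.mem_filter.mp he).2; simpa using this)]
    simp
  rw [hB]
  apply List.flatMap_congr
  intro c hc
  simp only [Function.comp_apply]
  rw [cond_eq]
  have hmem : c ∈ L ↔ ("aeiouAEIOU ".toList).contains c = false := by
    constructor
    · intro h; simpa using (List.mem_filter.mp h).2
    · intro h
      exact List.mem_filter.mpr ⟨(PySem.Set.mem_ofList _ _).mpr hc, by simp only [h, Bool.not_false]⟩

  by_cases h : ("aeiouAEIOU ".toList).contains c = true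
  · have hnL : c ∉ L := fun hm => by rw [hmem.mp hm] at h; cases h
    rw [if_pos h]
    simp only [expandP, if_neg hnL]
    simp
  · have hf : ("aeiouAEIOU ".toList).contains c = false := by simpa using h
    have hL' : c ∈ L := hmem.mpr hf
    rw [if_neg h]
    simp only [expandP, if_pos hL']
    simp
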